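-- pv_equiv track=rewrite | github.com/sangeon22/CodingTest | 프로그래머스/1/161989. 덧칠하기/덧칠하기.py | solution
-- ===== SOURCE A (Python) =====
-- def solution(n, m, section):
--     answer = 0
--     i = 1
--     while i <= n:
--         if i in section:
--             section.pop(section.index(i))
--             answer += 1
--             if len(section):
--                 if section[0] - i > m:
--                     i = section[0]
--                 else:
--                     i += m
--         else:
--             i += 1
--     # roller = []
--     # c_section = section.copy()
--     #
--     # for i in section:
--     #     if i not in roller:
--     #         temp = [j for j in range(i, i + m)]
--     #         for k in temp:
--     #             if k in c_section:
--     #                 c_section.pop(c_section.index(k))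
--     #                 answer += 1
--     #                 roller = temp
--     #                 break
--
--     return answer
-- ===== SOURCE B (Python) =====
-- def solution(n, m, section):
--     pending = list(section)
--     answer = 0
--     i = 1
--     while pending:
--         # next paint: the smallest pending section the scan can still reach, i.e. in [i, n]
--         reachable = [s for s in pending if i <= s <= n]
--         if not reachable:
--             break
--         t = min(reachable)
--         pending.remove(t)
--         answer += 1
--         if not pending:
--             break
--         # resume at the later of: the end of the painted stretch, and the first pending entry
--         i = max(t + m, pending[0])
--     return answer
-- ===== Notes on version B (the rewrite author's own statement) =====
-- stated objective: faster
-- what changed: A steps a counter i one-by-one from 1 to n, testing list membership at every step (and mutates the caller's list; the equivalence is about the return value only); B works per paint round: it jumps straight to the smallest pending section in [i, n], removes it, and resumes at max(end of painted stretch, first pending entry), so the cost no longer depends on n.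
import Mathlib
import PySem

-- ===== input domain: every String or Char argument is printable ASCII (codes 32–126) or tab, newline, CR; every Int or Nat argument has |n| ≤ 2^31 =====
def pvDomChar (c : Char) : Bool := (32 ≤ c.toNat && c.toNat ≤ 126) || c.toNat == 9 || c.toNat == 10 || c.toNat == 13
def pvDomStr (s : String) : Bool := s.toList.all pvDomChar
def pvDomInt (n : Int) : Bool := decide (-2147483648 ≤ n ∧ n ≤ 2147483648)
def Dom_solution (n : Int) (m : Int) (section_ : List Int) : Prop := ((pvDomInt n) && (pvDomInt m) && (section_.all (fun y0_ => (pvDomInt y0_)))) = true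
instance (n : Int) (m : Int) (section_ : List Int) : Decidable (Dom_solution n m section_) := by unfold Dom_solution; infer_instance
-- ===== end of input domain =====

-- B replaces A's unit-step scan of i = 1..n by per-paint rounds that jump straight to the smallest
-- reachable pending section; A also mutates the caller's list — the equivalence is about the return value only.


-- a successful remove? shortens the list by one (used for termination of both ports)
theorem remove?_shorter {xs ys : List Int} {v : Int} (h : PySem.List.remove? xs v = some ys) :
    ys.length < xs.length := by
  have hv : v ∈ xs := by
    by_contra hnv
    rw [(PySem.List.remove?_eq_none_iff xs v).mpr hnv] at h
    simp at h
  rw [PySem.List.remove?_eq_some_erase xs v hv] at h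
  cases h
  have := List.length_erase_of_mem hv
  have : 0 < xs.length := List.length_pos_of_mem hv
  omega

-- ===== PORT A =====
-- while i <= n: if i in section: pop(index(i)); …  — 'section.pop(section.index(i))' removes the
-- first occurrence of i, which is exactly PySem.List.remove? (i is present on this branch).
def solLoop (n : Int) (m : Int) (section_ : List Int) (i : Int) (answer : Int) : Int :=
  if h : i ≤ n then
    if section_.contains i then
      match hr : PySem.List.remove? section_ i with
      | none => answer   -- unreachable: i ∈ section_
      | some [] => solLoop n m [] i (answer + 1)
      | some (x :: tl) =>
          if x - i > m then solLoop n m (x :: tl) x (answer + 1)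
          else solLoop n m (x :: tl) (i + m) (answer + 1)
    else solLoop n m section_ (i + 1) answer
  else answer
termination_by (section_.length, (n + 1 - i).toNat)
decreasing_by
  · exact Prod.Lex.left _ _ (remove?_shorter hr)
  · exact Prod.Lex.left _ _ (remove?_shorter hr)
  · exact Prod.Lex.left _ _ (remove?_shorter hr)
  · exact Prod.Lex.right _ (by omega)

def solution (n : Int) (m : Int) (section_ : List Int) : Int :=
  solLoop n m section_ 1 0

-- ===== PORT B =====
-- while pending: reachable = [s for s in pending if i <= s <= n]; t = min(reachable); pending.remove(t);
-- if pending: i = max(t + m, pending[0])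
def altLoop (n : Int) (m : Int) (pending : List Int) (i : Int) (answer : Int) : Int :=
  if pending.isEmpty then answer
  else
    match PySem.List.min? (pending.filter (fun s => decide (i ≤ s) && decide (s ≤ n))) (fun x => x) with
    | none => answer                     -- reachable empty: break
    | some t =>
      match hr : PySem.List.remove? pending t with
      | none => answer                   -- unreachable: t ∈ pending
      | some [] => answer + 1            -- pending exhausted: break
      | some (x :: tl) => altLoop n m (x :: tl) (max (t + m) x) (answer + 1)
termination_by pending.length
decreasing_by exact remove?_shorter hr

def solution_alt (n : Int) (m : Int) (section_ : List Int) : Int :=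
  altLoop n m section_ 1 0

-- ===== PRECONDITION & SPEC =====
def Spec_solution (n : Int) (m : Int) (section_ : List Int) (out : Int) : Prop := out = solution_alt n m section_
instance (n : Int) (m : Int) (section_ : List Int) (out : Int) : Decidable (Spec_solution n m section_ out) := by unfold Spec_solution; infer_instance

-- ===== CLAIM (what is proved, stated in full; the proofs are below) =====
def Claim_equal_solution : Prop := ∀ (n : Int) (m : Int) (section_ : List Int), Dom_solution n m section_ → Spec_solution n m section_ (solution n m section_)

-- ===== LEMMAS AND PROOFS =====

theorem altLoop_stop (n m : Int) (lst : List Int) (i a : Int) (h : ¬ i ≤ n) :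
    altLoop n m lst i a = a := by
  rw [altLoop.eq_def]
  have hf : lst.filter (fun x => decide (i ≤ x) && decide (x ≤ n)) = [] :=
    List.filter_eq_nil_iff.mpr (fun x _ => by simp; omega)
  rw [hf]
  split <;> simp [PySem.List.min?]

theorem solLoop_nil (n m : Int) : ∀ (K : Nat) (i a : Int), (n + 1 - i).toNat ≤ K →
    solLoop n m [] i a = a := by
  intro K
  induction K with
  | zero =>
    intro i a hK
    rw [solLoop]
    rw [dif_neg (by omega)]
  | succ K ih =>
    intro i a hK
    by_cases hin : i ≤ n
    · rw [solLoop, dif_pos hin]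
      simp only [List.contains, List.elem_nil, Bool.false_eq_true, if_false]
      exact ih (i + 1) a (by omega)
    · rw [solLoop, dif_neg hin]

theorem min_cand (lst : List Int) (i n : Int) (hm : i ∈ lst) (hn : i ≤ n) :
    PySem.List.min? (lst.filter (fun x => decide (i ≤ x) && decide (x ≤ n))) (fun x => x) = some i := by
  have hi : i ∈ lst.filter (fun x => decide (i ≤ x) && decide (x ≤ n)) := by
    simp [List.mem_filter, hm, hn]
  cases hmin : PySem.List.min? (lst.filter (fun x => decide (i ≤ x) && decide (x ≤ n))) (fun x => x) with
  | none =>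
    rw [PySem.List.min?_eq_none_iff] at hmin
    rw [hmin] at hi
    exact absurd hi (List.not_mem_nil)
  | some t =>
    have ht := PySem.List.min?_mem hmin
    have h1 : i ≤ t := by
      have := List.mem_filter.mp ht
      simp at this
      omega
    have h2 : t ≤ i := PySem.List.min?_isMin hmin i hi
    have : t = i := le_antisymm h2 h1
    rw [this]

theorem filter_shift (lst : List Int) (i n : Int) (h : i ∉ lst) :
    lst.filter (fun x => decide (i + 1 ≤ x) && decide (x ≤ n)) =
    lst.filter (fun x => decide (i ≤ x) && decide (x ≤ n)) := by
  apply List.filter_congr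
  intro x hx
  have hne : x ≠ i := fun e => h (e ▸ hx)
  rw [show (decide (i + 1 ≤ x)) = (decide (i ≤ x)) from decide_eq_decide.mpr (by omega)]

theorem loops_eq (n m : Int) : ∀ (L : Nat) (lst : List Int), lst.length = L →
    ∀ (K : Nat) (i a : Int), (n + 1 - i).toNat ≤ K →
    solLoop n m lst i a = altLoop n m lst i a := by
  intro L
  induction L with
  | zero =>
    intro lst hL K i a hK
    have hnil : lst = [] := List.eq_nil_of_length_eq_zero hL
    subst hnil
    by_cases hin : i ≤ n
    · rw [solLoop_nil n m K i a hK, altLoop.eq_def]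
      simp
    · rw [solLoop_nil n m K i a hK, altLoop_stop n m [] i a hin]
  | succ L ihL =>
    intro lst hL K
    induction K with
    | zero =>
      intro i a hK
      have hin : ¬ i ≤ n := by omega
      rw [solLoop, dif_neg hin, altLoop_stop n m lst i a hin]
    | succ K ihK =>
      intro i a hK
      by_cases hin : i ≤ n
      · by_cases hc : i ∈ lst
        · -- pop branch
          have hrem : PySem.List.remove? lst i = some (lst.erase i) :=
            PySem.List.remove?_eq_some_erase lst i hc
          have hmin := min_cand lst i n hc hin
          have hcont : lst.contains i = true := by simpa using hc
          have hne : lst.isEmpty = false := by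
            cases lst with
            | nil => exact absurd hc (List.not_mem_nil)
            | cons h t => rfl
          have hlen : (lst.erase i).length = L := by
            have := List.length_erase_of_mem hc
            omega
          rw [solLoop, dif_pos hin, altLoop.eq_def, hne, hmin]
          simp only [hcont, if_true, Bool.false_eq_true, if_false]
          split
          · rename_i h1; rw [hrem] at h1
          · exact solLoop_nil n m (n + 1 - i).toNat i (a + 1) le_rfl
          · rename_i x tl h1
            have hlen2 : (x :: tl).length = L := by
              rw [hrem] at h1
              have h3 : lst.erase i = x :: tl := by simpa using h1
              rw [← h3]; exact hlen
            by_cases hgt : x - i > m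
            · rw [if_pos hgt, show max (i + m) x = x by omega]
              exact ihL (x :: tl) hlen2 (n + 1 - x).toNat x (a + 1) le_rfl
            · rw [if_neg hgt, show max (i + m) x = i + m by omega]
              exact ihL (x :: tl) hlen2 (n + 1 - (i + m)).toNat (i + m) (a + 1) le_rfl
        · -- skip branch
          have hcont : lst.contains i = false := by simpa using hc
          rw [solLoop, dif_pos hin]
          simp only [hcont, Bool.false_eq_true, if_false]
          rw [ihK (i + 1) a (by omega)]
          rw [altLoop.eq_def, altLoop.eq_def, filter_shift lst i n hc]
      · rw [solLoop, dif_neg hin, altLoop_stop n m lst i a hin]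

-- ===== VERDICT (by name: the statement is the Claim_ definition above) =====
theorem solution_spec : Claim_equal_solution := by
  intro n m section_ _
  unfold Spec_solution solution solution_alt
  exact loops_eq n m section_.length section_ rfl (n + 1 - 1).toNat 1 0 le_rfl
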